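-- pv_equiv track=rewrite | github.com/mikelmyers/primordia-experiments | experiments/05-topology/capture_states.py | generate_philosophy_inputs
-- ===== SOURCE A (Python) =====
-- def generate_philosophy_inputs(n=100):
--     """Abstract philosophy prompts."""
--     prompts = [
--         "The nature of consciousness remains fundamentally mysterious because",
--         "Free will is an illusion created by the complexity of neural processes",
--         "If reality is a simulation, the distinction between real and simulated breaks down",
--         "The concept of self is a narrative constructed from fragmented experiences",
--         "Time might not flow but rather exist as a static block where all moments coexist",
--         "Moral truth cannot be derived from natural facts alone according to the is-ought gap",
--         "Language shapes thought in ways we cannot perceive from within our own linguistic framework",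
--         "The hard problem of consciousness asks why subjective experience exists at all",
--         "Existence precedes essence means we create meaning through choices not nature",
--         "The ship of Theseus shows that identity depends on what we choose to track",
--         "Infinite regress in justification suggests foundational knowledge may be impossible",
--         "The absurdity of existence does not negate the need to find meaning within it",
--         "Qualia the subjective quality of experience may be irreducible to physical description",
--         "If a tree falls in a forest and no one hears it the question reveals our confusion about sound",
--         "Personal identity over time requires some continuity but the nature of that continuity is debated",
--         "The problem of other minds is whether we can ever truly know another is conscious",
--         "Beauty might be objective or it might be a projection of our evolved preferences",
--         "The trolley problem reveals that moral intuitions conflict with utilitarian calculation",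
--         "Determinism and moral responsibility seem incompatible yet we hold people accountable",
--         "The meaning of life might be that there is no meaning and we must create our own",
--     ]
--     extensions = [
--         "and this has implications for how we build intelligent systems",
--         "which challenges our assumptions about the nature of mind",
--         "suggesting that our categories are conventions not discoveries",
--         "and no amount of analysis can fully resolve the tension",
--         "pointing toward a deeper structure beneath ordinary experience",
--     ]
--     inputs = []
--     for i in range(n):
--         base = prompts[i % len(prompts)]
--         ext = extensions[i % len(extensions)]
--         inputs.append(f"{base} {ext}")
--     return inputs
-- ===== SOURCE B (Python) =====
-- def generate_philosophy_inputs(n=100):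
--     """Abstract philosophy prompts."""
--     prompts = [
--         "The nature of consciousness remains fundamentally mysterious because",
--         "Free will is an illusion created by the complexity of neural processes",
--         "If reality is a simulation, the distinction between real and simulated breaks down",
--         "The concept of self is a narrative constructed from fragmented experiences",
--         "Time might not flow but rather exist as a static block where all moments coexist",
--         "Moral truth cannot be derived from natural facts alone according to the is-ought gap",
--         "Language shapes thought in ways we cannot perceive from within our own linguistic framework",
--         "The hard problem of consciousness asks why subjective experience exists at all",
--         "Existence precedes essence means we create meaning through choices not nature",
--         "The ship of Theseus shows that identity depends on what we choose to track",
--         "Infinite regress in justification suggests foundational knowledge may be impossible",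
--         "The absurdity of existence does not negate the need to find meaning within it",
--         "Qualia the subjective quality of experience may be irreducible to physical description",
--         "If a tree falls in a forest and no one hears it the question reveals our confusion about sound",
--         "Personal identity over time requires some continuity but the nature of that continuity is debated",
--         "The problem of other minds is whether we can ever truly know another is conscious",
--         "Beauty might be objective or it might be a projection of our evolved preferences",
--         "The trolley problem reveals that moral intuitions conflict with utilitarian calculation",
--         "Determinism and moral responsibility seem incompatible yet we hold people accountable",
--         "The meaning of life might be that there is no meaning and we must create our own",
--     ]
--     extensions = [
--         "and this has implications for how we build intelligent systems",
--         "which challenges our assumptions about the nature of mind",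
--         "suggesting that our categories are conventions not discoveries",
--         "and no amount of analysis can fully resolve the tension",
--         "pointing toward a deeper structure beneath ordinary experience",
--     ]
--     # One full period: pair the prompts elementwise with the extensions tiled to the
--     # same length (len(prompts) == 4 * len(extensions)).  No indexing, no modulus.
--     cycle = [p + " " + e for p, e in zip(prompts, extensions * 4)]
--     # Emit whole periods plus a prefix of the last partial period.
--     q, r = divmod(max(n, 0), len(cycle))
--     return cycle * q + cycle[:r]
-- ===== Notes on version B (the rewrite author's own statement) =====
-- stated objective: alternative
-- what changed: B builds one full period by zipping the prompts with the extensions tiled to the same length (no index arithmetic), then emits the result as whole-period replication plus a prefix slice (cycle*q + cycle[:r] with q,r = divmod(n,20)) instead of A's per-element loop doing two modular lookups and a format for each of the n items.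
import Mathlib
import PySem

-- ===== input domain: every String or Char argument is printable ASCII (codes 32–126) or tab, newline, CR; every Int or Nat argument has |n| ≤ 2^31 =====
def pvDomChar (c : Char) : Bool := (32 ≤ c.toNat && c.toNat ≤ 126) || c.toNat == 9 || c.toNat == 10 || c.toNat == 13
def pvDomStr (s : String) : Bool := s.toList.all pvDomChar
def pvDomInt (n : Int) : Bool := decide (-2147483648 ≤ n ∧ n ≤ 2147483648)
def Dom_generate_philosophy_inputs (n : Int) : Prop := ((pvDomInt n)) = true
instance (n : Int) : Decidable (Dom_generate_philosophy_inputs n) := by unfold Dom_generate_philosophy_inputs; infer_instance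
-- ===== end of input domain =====

-- B builds one full period by zipping prompts with the tiled extensions and emits
-- whole-period replication plus a prefix slice, instead of A's per-element modular lookups.

-- shared string constants (the literal lists both Pythons carry)
def pvPrompts : List String := [
  "The nature of consciousness remains fundamentally mysterious because",
  "Free will is an illusion created by the complexity of neural processes",
  "If reality is a simulation, the distinction between real and simulated breaks down",
  "The concept of self is a narrative constructed from fragmented experiences",
  "Time might not flow but rather exist as a static block where all moments coexist",
  "Moral truth cannot be derived from natural facts alone according to the is-ought gap",
  "Language shapes thought in ways we cannot perceive from within our own linguistic framework",
  "The hard problem of consciousness asks why subjective experience exists at all",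
  "Existence precedes essence means we create meaning through choices not nature",
  "The ship of Theseus shows that identity depends on what we choose to track",
  "Infinite regress in justification suggests foundational knowledge may be impossible",
  "The absurdity of existence does not negate the need to find meaning within it",
  "Qualia the subjective quality of experience may be irreducible to physical description",
  "If a tree falls in a forest and no one hears it the question reveals our confusion about sound",
  "Personal identity over time requires some continuity but the nature of that continuity is debated",
  "The problem of other minds is whether we can ever truly know another is conscious",
  "Beauty might be objective or it might be a projection of our evolved preferences",
  "The trolley problem reveals that moral intuitions conflict with utilitarian calculation",
  "Determinism and moral responsibility seem incompatible yet we hold people accountable",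
  "The meaning of life might be that there is no meaning and we must create our own"]

def pvExtensions : List String := [
  "and this has implications for how we build intelligent systems",
  "which challenges our assumptions about the nature of mind",
  "suggesting that our categories are conventions not discoveries",
  "and no amount of analysis can fully resolve the tension",
  "pointing toward a deeper structure beneath ordinary experience"]

-- ===== PORT A =====
-- for i in range(n): base = prompts[i % 20]; ext = extensions[i % 5]; inputs.append(f"{base} {ext}")
def generate_philosophy_inputs (n : Int) : List String :=
  (PySem.List.pyRange 0 n 1).foldl
    (fun inputs i =>
      let base := PySem.List.pyGetD pvPrompts (PySem.Int.mod i 20) ""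
      let ext := PySem.List.pyGetD pvExtensions (PySem.Int.mod i 5) ""
      inputs ++ [base ++ " " ++ ext]) []

-- ===== PORT B =====
-- cycle = [p + " " + e for p, e in zip(prompts, extensions * 4)]
def pvCycle : List String :=
  List.zipWith (fun p e => p ++ " " ++ e) pvPrompts
    (pvExtensions ++ pvExtensions ++ pvExtensions ++ pvExtensions)

-- q, r = divmod(max(n, 0), len(cycle)); return cycle * q + cycle[:r]
-- ('cycle * q' is flatten of q.toNat copies — exact since q ≥ 0 here; 'cycle[:r]' is PySem.List.slice)
def generate_philosophy_inputs_alt (n : Int) : List String :=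
  let m := max n 0
  let q := PySem.Int.floordiv m (PySem.List.len pvCycle)
  let r := PySem.Int.mod m (PySem.List.len pvCycle)
  (List.replicate q.toNat pvCycle).flatten ++ PySem.List.slice pvCycle none (some r)

-- ===== PRECONDITION & SPEC =====
def Spec_generate_philosophy_inputs (n : Int) (out : List String) : Prop := out = generate_philosophy_inputs_alt n
instance (n : Int) (out : List String) : Decidable (Spec_generate_philosophy_inputs n out) := by unfold Spec_generate_philosophy_inputs; infer_instance

-- ===== CLAIM (what is proved, stated in full; the proofs are below) =====
def Claim_equal_generate_philosophy_inputs : Prop := ∀ (n : Int), Dom_generate_philosophy_inputs n → Spec_generate_philosophy_inputs n (generate_philosophy_inputs n)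

-- ===== LEMMAS AND PROOFS =====

theorem pvCycle_length : pvCycle.length = 20 := by decide

-- the zipWith-built period table, re-read as the indexed comprehension form
theorem pvCycle_eq_map : pvCycle =
    (PySem.List.pyRange 0 20 1).map
      (fun j => PySem.List.pyGetD pvPrompts j "" ++ " " ++
        PySem.List.pyGetD pvExtensions (PySem.Int.mod j 5) "") := by rfl

-- A's per-element string is exactly the (i % 20)-th entry of B's period table
theorem pvCycle_get (i : Int) :
    PySem.List.pyGetD pvPrompts (PySem.Int.mod i 20) "" ++ " " ++
      PySem.List.pyGetD pvExtensions (PySem.Int.mod i 5) "" =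
    PySem.List.pyGetD pvCycle (PySem.Int.mod i 20) "" := by
  rw [pvCycle_eq_map,
    PySem.List.pyGetD_map_pyRange_of_nonneg _ _ _ _
      (PySem.Int.mod_nonneg i (by norm_num)) (PySem.Int.mod_lt i (by norm_num))]
  simp only [PySem.Int.mod_eq_emod_of_pos (by norm_num : (0:Int) < 5),
    PySem.Int.mod_eq_emod_of_pos (by norm_num : (0:Int) < 20),
    Int.emod_emod_of_dvd i (by norm_num : (5:Int) ∣ 20)]

-- cast bridge: Python-level lookup at ↑x % 20 is the Nat-level getD at x % 20
theorem pvGetCast (x : ℕ) :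
    PySem.List.pyGetD pvCycle ((x : Int) % 20) "" = pvCycle.getD (x % 20) "" := by
  have h : ((x : Int) % 20) = ((x % 20 : ℕ) : Int) := by omega
  rw [h, PySem.List.pyGetD_natCast]

-- one period of the map-form output appended element by element
theorem pvPeriodic (m : ℕ) :
    (List.range m).map (fun j => pvCycle.getD (j % 20) "") =
      (List.replicate (m / 20) pvCycle).flatten ++ pvCycle.take (m % 20) := by
  induction m with
  | zero => simp
  | succ m ih =>
    rw [List.range_succ, List.map_append, ih]
    have hget : pvCycle.getD (m % 20) "" = pvCycle[m % 20]'(by rw [pvCycle_length]; omega) :=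
      List.getD_eq_getElem _ _ _
    by_cases h : m % 20 = 19
    · have hq : (m + 1) / 20 = m / 20 + 1 := by omega
      have hr : (m + 1) % 20 = 0 := by omega
      have htake : pvCycle.take (m % 20 + 1) =
          pvCycle.take (m % 20) ++ [pvCycle[m % 20]'(by rw [pvCycle_length]; omega)] := by
        rw [List.take_add_one]
        simp [List.getElem?_eq_getElem (show m % 20 < pvCycle.length by rw [pvCycle_length]; omega)]
      have hfull : pvCycle.take (m % 20 + 1) = pvCycle := by
        rw [h]; exact List.take_of_length_le (by rw [pvCycle_length])
      rw [hq, hr, List.replicate_succ', List.flatten_append]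
      simp only [List.map_cons, List.map_nil, hget, List.take_zero, List.append_nil,
        List.flatten_cons, List.flatten_nil, List.append_assoc]
      congr 1
      exact htake.symm.trans hfull
    · have hq : (m + 1) / 20 = m / 20 := by omega
      have hr : (m + 1) % 20 = m % 20 + 1 := by omega
      rw [hq, hr, List.take_add_one, List.append_assoc]
      congr 2
      simp [List.getElem?_eq_getElem (show m % 20 < pvCycle.length by rw [pvCycle_length]; omega)]

-- ===== VERDICT (by name: the statement is the Claim_ definition above) =====
theorem generate_philosophy_inputs_spec : Claim_equal_generate_philosophy_inputs := by
  intro n _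
  unfold Spec_generate_philosophy_inputs generate_philosophy_inputs generate_philosophy_inputs_alt
  rw [PySem.List.foldl_append_singleton_eq_map]
  rw [List.map_congr_left (fun i _ => pvCycle_get i)]
  by_cases hn : n ≤ 0
  · rw [PySem.List.pyRange_one_eq_nil (by omega), List.map_nil]
    have hm : max n 0 = 0 := by omega
    simp [hm, PySem.List.len_eq, pvCycle_length, Nat.cast_ofNat,
      PySem.List.slice_to pvCycle (le_refl (0:Int))]
  · push Not at hn
    have hm : max n 0 = n := by omega
    rw [PySem.List.pyRange_one, List.map_map]
    simp only [hm, Int.sub_zero, Function.comp_def, zero_add,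
      PySem.List.len_eq, pvCycle_length, Nat.cast_ofNat,
      PySem.Int.floordiv_eq_ediv_of_pos (show (0:Int) < 20 by norm_num),
      PySem.Int.mod_eq_emod_of_pos (show (0:Int) < 20 by norm_num)]
    rw [List.map_congr_left (fun (x : ℕ) _ => pvGetCast x)]
    rw [PySem.List.slice_to pvCycle (by omega : (0:Int) ≤ n % 20)]
    have h1 : (n / 20).toNat = n.toNat / 20 := by omega
    have h2 : (n % 20).toNat = n.toNat % 20 := by omega
    rw [h1, h2]
    exact pvPeriodic n.toNat
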